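-- pv_equiv track=rewrite | github.com/computerphilosopher/BOJ | 10800/10800.pypy3.py | solve
-- ===== SOURCE A (Python) =====
-- def solve(balls:list):
--
--     balls.sort()
--     ret = dict()
--
--     color_sum = dict()
--     same_weight = dict()
--
--     color_weight = dict()
--     weight_sum = 0
--
--     for ball in balls:
--         weight, color, idx = ball
--
--         if weight not in same_weight:
--             same_weight[weight] = 0
--
--         if color not in color_sum:
--             color_sum[color] = 0
--
--         if (color, weight) not in color_weight:
--             color_weight[(color,weight)] = 0
--
--         ret[idx] = weight_sum - color_sum[color] - same_weight[weight] + color_weight[(color,weight)]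
--
--         weight_sum += weight
--         color_sum[color] += weight
--         same_weight[weight] += weight
--         color_weight[(color,weight)] += weight
--
--     return ret
-- ===== SOURCE B (Python) =====
-- def solve(balls: list):
--     # grouped two-pass over equal-weight runs: ret uses sums frozen before the run,
--     # so equal-weight balls never count each other; sorts in place like the original
--     balls.sort()
--     ret = {}
--     color_sum = {}
--     weight_sum = 0
--     i = 0
--     n = len(balls)
--     while i < n:
--         w = balls[i][0]
--         j = i
--         while j < n and balls[j][0] == w:
--             j += 1
--         for k in range(i, j):
--             _, color, idx = balls[k]
--             ret[idx] = weight_sum - color_sum.get(color, 0)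
--         for k in range(i, j):
--             weight, color, _ = balls[k]
--             weight_sum += weight
--             color_sum[color] = color_sum.get(color, 0) + weight
--         i = j
--     return ret
-- ===== Notes on version B (the rewrite author's own statement) =====
-- stated objective: simpler
-- what changed: A keeps four running dicts (color_sum, same_weight, color_weight, weight_sum) and an inclusion-exclusion formula per ball; B walks the sorted list in runs of equal weight with a grouped two-pass, reading only a global weight_sum and one color_sum dict frozen before each run, so the two tie-correction dicts disappear.
import Mathlib
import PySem

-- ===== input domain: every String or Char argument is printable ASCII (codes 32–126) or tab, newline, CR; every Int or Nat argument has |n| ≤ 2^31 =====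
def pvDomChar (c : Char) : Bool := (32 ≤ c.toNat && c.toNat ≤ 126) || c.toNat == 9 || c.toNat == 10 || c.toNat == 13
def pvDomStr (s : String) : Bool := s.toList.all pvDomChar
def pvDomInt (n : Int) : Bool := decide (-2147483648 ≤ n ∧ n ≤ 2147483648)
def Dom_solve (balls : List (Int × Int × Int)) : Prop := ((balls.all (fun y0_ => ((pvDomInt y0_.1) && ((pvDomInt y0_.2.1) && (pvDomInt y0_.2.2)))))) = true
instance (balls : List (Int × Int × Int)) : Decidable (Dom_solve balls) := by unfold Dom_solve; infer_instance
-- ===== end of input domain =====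

-- B replaces A's four running dicts by a grouped two-pass over equal-weight runs of the
-- sorted list (simpler bookkeeping, same cost). Both Pythons sort the argument in place;
-- the equivalence proved here is about the return value (both perform the same mutation).

-- Shared hand port of `balls.sort()`: Python compares Int-triples lexicographically; this is
-- the same insertion sort as PySem.List.sorted (cf. sorted_eq_foldl_insertBy) with an explicit
-- lexicographic comparator, exact on all inputs.
def ballLT (a b : Int × Int × Int) : Bool :=
  a.1 < b.1 || (a.1 == b.1 && (a.2.1 < b.2.1 || (a.2.1 == b.2.1 && a.2.2 < b.2.2)))

def pySortBalls (xs : List (Int × Int × Int)) : List (Int × Int × Int) :=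
  xs.foldl (fun acc x => PySem.List.insertBy ballLT x acc) []

-- ===== PORT A =====
-- A's loop body: state = (ret, color_sum, same_weight, color_weight, weight_sum)
def solveStep
    (st : PySem.Dict Int Int × PySem.Dict Int Int × PySem.Dict Int Int × PySem.Dict (Int × Int) Int × Int)
    (ball : Int × Int × Int) :
    PySem.Dict Int Int × PySem.Dict Int Int × PySem.Dict Int Int × PySem.Dict (Int × Int) Int × Int :=
  let weight := ball.1
  let color := ball.2.1
  let idx := ball.2.2
  let sw := if st.2.2.1.contains weight then st.2.2.1 else st.2.2.1.insert weight 0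
  let cs := if st.2.1.contains color then st.2.1 else st.2.1.insert color 0
  let cw := if st.2.2.2.1.contains (color, weight) then st.2.2.2.1 else st.2.2.2.1.insert (color, weight) 0
  let ret := st.1.insert idx
    (st.2.2.2.2 - cs.getD color 0 - sw.getD weight 0 + cw.getD (color, weight) 0)
  (ret, cs.insert color (cs.getD color 0 + weight),
   sw.insert weight (sw.getD weight 0 + weight),
   cw.insert (color, weight) (cw.getD (color, weight) 0 + weight),
   st.2.2.2.2 + weight)

def solve (balls : List (Int × Int × Int)) : List (Int × Int) :=
  (((pySortBalls balls).foldl solveStep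
      (PySem.Dict.empty, PySem.Dict.empty, PySem.Dict.empty, PySem.Dict.empty, 0)).1).items

-- ===== PORT B =====
-- first inner pass: ret[idx] = weight_sum - color_sum.get(color, 0), sums frozen before the run
def altRet (wsum : Int) (csum : PySem.Dict Int Int) (ret : PySem.Dict Int Int)
    (grp : List (Int × Int × Int)) : PySem.Dict Int Int :=
  grp.foldl (fun r x => r.insert x.2.2 (wsum - csum.getD x.2.1 0)) ret

-- second inner pass: commit the run's weights into color_sum
def altCsum (csum : PySem.Dict Int Int) (grp : List (Int × Int × Int)) : PySem.Dict Int Int :=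
  grp.foldl (fun d x => d.insert x.2.1 (d.getD x.2.1 0 + x.1)) csum

-- outer while over runs of equal weight
def altLoop : List (Int × Int × Int) → PySem.Dict Int Int → PySem.Dict Int Int → Int → PySem.Dict Int Int
  | [], ret, _, _ => ret
  | b :: rest, ret, csum, wsum =>
    let grp := b :: rest.takeWhile (fun x => x.1 == b.1)
    let rest' := rest.dropWhile (fun x => x.1 == b.1)
    altLoop rest' (altRet wsum csum ret grp) (altCsum csum grp)
      (grp.foldl (fun a x => a + x.1) wsum)
  termination_by l => l.length
  decreasing_by
    simpa [Nat.lt_succ_iff] using List.length_dropWhile_le (fun x => x.1 == b.1) rest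

def solve_alt (balls : List (Int × Int × Int)) : List (Int × Int) :=
  (altLoop (pySortBalls balls) PySem.Dict.empty PySem.Dict.empty 0).items

-- ===== PRECONDITION & SPEC =====
def Spec_solve (balls : List (Int × Int × Int)) (out : List (Int × Int)) : Prop := out = solve_alt balls
instance (balls : List (Int × Int × Int)) (out : List (Int × Int)) : Decidable (Spec_solve balls out) := by unfold Spec_solve; infer_instance

-- ===== CLAIM (what is proved, stated in full; the proofs are below) =====
def Claim_equal_solve : Prop := ∀ (balls : List (Int × Int × Int)), Dom_solve balls → Spec_solve balls (solve balls)

-- ===== LEMMAS AND PROOFS =====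

-- comparator facts
lemma ballLT_asymm {a b : Int × Int × Int} (h : ballLT a b = true) : ballLT b a = false := by
  simp [ballLT] at *; omega

lemma ballLT_false_trans {x y z : Int × Int × Int}
    (h1 : ballLT x y = true) (h2 : ballLT z y = false) : ballLT z x = false := by
  simp [ballLT] at *; omega

lemma ballLT_false_weight_le {a b : Int × Int × Int} (h : ballLT b a = false) : a.1 ≤ b.1 := by
  simp [ballLT] at h; omega

-- insertion keeps the "never strictly greater later" pairwise invariant
lemma insertBy_pairwise (x : Int × Int × Int) (ys : List (Int × Int × Int))
    (h : ys.Pairwise (fun a b => ballLT b a = false)) :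
    (PySem.List.insertBy ballLT x ys).Pairwise (fun a b => ballLT b a = false) := by
  induction ys with
  | nil => simp [PySem.List.insertBy]
  | cons y ys ih =>
    rw [List.pairwise_cons] at h
    by_cases hb : ballLT x y = true
    · rw [PySem.List.insertBy, if_pos hb]
      refine List.pairwise_cons.2 ⟨?_, List.pairwise_cons.2 ⟨h.1, h.2⟩⟩
      intro z hz
      rcases List.mem_cons.1 hz with rfl | hz'
      · exact ballLT_asymm hb
      · exact ballLT_false_trans hb (h.1 z hz')
    · rw [PySem.List.insertBy, if_neg hb]
      refine List.pairwise_cons.2 ⟨?_, ih h.2⟩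
      intro z hz
      rcases (PySem.List.mem_insertBy ballLT x z ys).1 hz with rfl | hz'
      · exact Bool.eq_false_iff.2 hb
      · exact h.1 z hz'

lemma pySortBalls_pairwise (xs : List (Int × Int × Int)) :
    (pySortBalls xs).Pairwise (fun a b => a.1 ≤ b.1) := by
  have key : ∀ (l : List (Int × Int × Int)) (acc : List (Int × Int × Int)),
      acc.Pairwise (fun a b => ballLT b a = false) →
      (l.foldl (fun acc x => PySem.List.insertBy ballLT x acc) acc).Pairwise
        (fun a b => ballLT b a = false) := by
    intro l
    induction l with
    | nil => intro acc h; exact h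
    | cons x l ih => intro acc h; exact ih _ (insertBy_pairwise x acc h)
  exact ((key xs [] (by simp)).imp (fun h => ballLT_false_weight_le h))

-- a dict guarded by "if k not in d: d[k] = 0" has the same getD everywhere
lemma getD_guard (d : PySem.Dict Int Int) (a k : Int) :
    (if d.contains a then d else d.insert a 0).getD k 0 = d.getD k 0 := by
  by_cases hc : d.contains a
  · rw [if_pos hc]
  · rw [if_neg hc]
    by_cases hk : k = a
    · subst hk
      rw [PySem.Dict.getD_insert_self]
      simp [PySem.Dict.getD, (PySem.Dict.get?_eq_none_iff_contains d k).2 (Bool.eq_false_iff.2 hc)]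
    · rw [PySem.Dict.getD_insert_of_ne _ _ _ hk]

lemma getD_guard' (d : PySem.Dict (Int × Int) Int) (a k : Int × Int) :
    (if d.contains a then d else d.insert a 0).getD k 0 = d.getD k 0 := by
  by_cases hc : d.contains a
  · rw [if_pos hc]
  · rw [if_neg hc]
    by_cases hk : k = a
    · subst hk
      rw [PySem.Dict.getD_insert_self]
      simp [PySem.Dict.getD, (PySem.Dict.get?_eq_none_iff_contains d k).2 (Bool.eq_false_iff.2 hc)]
    · rw [PySem.Dict.getD_insert_of_ne _ _ _ hk]

-- getD of B's per-run color_sum commit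
lemma altCsum_getD (gl : List (Int × Int × Int)) (csum : PySem.Dict Int Int) (c : Int) :
    (altCsum csum gl).getD c 0
      = csum.getD c 0 + ((gl.filter (fun x => x.2.1 == c)).map (·.1)).sum := by
  induction gl generalizing csum with
  | nil => simp [altCsum]
  | cons x gs ih =>
    rw [altCsum, List.foldl_cons, show ∀ d gl, List.foldl _ d gl = altCsum d gl from fun _ _ => rfl, ih]
    by_cases hc : x.2.1 = c
    · subst hc
      rw [PySem.Dict.getD_insert_self]
      simp [List.filter_cons]
      ring
    · rw [PySem.Dict.getD_insert_of_ne _ _ _ (fun h => hc h.symm)]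
      simp [List.filter_cons, hc]

-- A's fold over one equal-weight run, against frozen sums ws0 / csB
lemma groupA (gl : List (Int × Int × Int)) (w : Int) (hw : ∀ x ∈ gl, x.1 = w)
    (ret : PySem.Dict Int Int) (csA csB sw : PySem.Dict Int Int)
    (cw : PySem.Dict (Int × Int) Int) (ws0 : Int)
    (hcs : ∀ c, csA.getD c 0 = csB.getD c 0 + cw.getD (c, w) 0) :
    (gl.foldl solveStep (ret, csA, sw, cw, ws0 + sw.getD w 0)).1
        = altRet ws0 csB ret gl
    ∧ (∀ c, (gl.foldl solveStep (ret, csA, sw, cw, ws0 + sw.getD w 0)).2.1.getD c 0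
        = csB.getD c 0 + (gl.foldl solveStep (ret, csA, sw, cw, ws0 + sw.getD w 0)).2.2.2.1.getD (c, w) 0)
    ∧ (∀ c, (gl.foldl solveStep (ret, csA, sw, cw, ws0 + sw.getD w 0)).2.2.2.1.getD (c, w) 0
        = cw.getD (c, w) 0 + ((gl.filter (fun x => x.2.1 == c)).map (·.1)).sum)
    ∧ (∀ c w', w' ≠ w → (gl.foldl solveStep (ret, csA, sw, cw, ws0 + sw.getD w 0)).2.2.2.1.getD (c, w') 0
        = cw.getD (c, w') 0)
    ∧ (∀ w', w' ≠ w → (gl.foldl solveStep (ret, csA, sw, cw, ws0 + sw.getD w 0)).2.2.1.getD w' 0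
        = sw.getD w' 0)
    ∧ (gl.foldl solveStep (ret, csA, sw, cw, ws0 + sw.getD w 0)).2.2.1.getD w 0
        = sw.getD w 0 + (gl.map (·.1)).sum
    ∧ (gl.foldl solveStep (ret, csA, sw, cw, ws0 + sw.getD w 0)).2.2.2.2
        = ws0 + (gl.foldl solveStep (ret, csA, sw, cw, ws0 + sw.getD w 0)).2.2.1.getD w 0 := by
  induction gl generalizing ret csA sw cw with
  | nil => simpa [altRet] using hcs
  | cons x gs ih =>
    obtain ⟨xw, c, i⟩ := x
    have hx : xw = w := hw (xw, c, i) List.mem_cons_self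
    subst hx
    have hw' : ∀ y ∈ gs, y.1 = xw := fun y hy => hw y (List.mem_cons_of_mem _ hy)
    rw [List.foldl_cons]
    have hstep : solveStep (ret, csA, sw, cw, ws0 + sw.getD xw 0) (xw, c, i)
        = (ret.insert i (ws0 - csB.getD c 0),
           (if csA.contains c then csA else csA.insert c 0).insert c (csA.getD c 0 + xw),
           (if sw.contains xw then sw else sw.insert xw 0).insert xw (sw.getD xw 0 + xw),
           (if cw.contains (c, xw) then cw else cw.insert (c, xw) 0).insert (c, xw) (cw.getD (c, xw) 0 + xw),
           ws0 + sw.getD xw 0 + xw) := by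
      simp only [solveStep, getD_guard, getD_guard']
      have : ws0 + sw.getD xw 0 - csA.getD c 0 - sw.getD xw 0 + cw.getD (c, xw) 0
          = ws0 - csB.getD c 0 := by rw [hcs c]; ring
      rw [this]
    rw [hstep]
    have hswv : ((if sw.contains xw then sw else sw.insert xw 0).insert xw (sw.getD xw 0 + xw)).getD xw 0
        = sw.getD xw 0 + xw := by rw [PySem.Dict.getD_insert_self]
    have hws' : ws0 + sw.getD xw 0 + xw
        = ws0 + ((if sw.contains xw then sw else sw.insert xw 0).insert xw (sw.getD xw 0 + xw)).getD xw 0 := by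
      rw [hswv]; ring
    rw [hws']
    have hcs1 : ∀ c', ((if csA.contains c then csA else csA.insert c 0).insert c (csA.getD c 0 + xw)).getD c' 0
        = csB.getD c' 0 + ((if cw.contains (c, xw) then cw else cw.insert (c, xw) 0).insert (c, xw) (cw.getD (c, xw) 0 + xw)).getD (c', xw) 0 := by
      intro c'
      by_cases hc' : c' = c
      · subst hc'
        rw [PySem.Dict.getD_insert_self, PySem.Dict.getD_insert_self, hcs c']
        ring
      · rw [PySem.Dict.getD_insert_of_ne _ _ _ hc', getD_guard,
            PySem.Dict.getD_insert_of_ne _ _ _ (by simp [hc']), getD_guard', hcs c']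
    obtain ⟨ih1, ih2, ih3, ih4, ih5, ih6, ih7⟩ := ih hw' (ret.insert i (ws0 - csB.getD c 0)) _ _ _ hcs1
    refine ⟨?_, ih2, ?_, ?_, ?_, ?_, ih7⟩
    · rw [ih1]; rfl
    · intro c'
      rw [ih3 c']
      by_cases hc' : c' = c
      · subst hc'
        rw [PySem.Dict.getD_insert_self]
        simp
        ring
      · rw [PySem.Dict.getD_insert_of_ne _ _ _ (by simp [hc']), getD_guard']
        have hcc : (c == c') = false := beq_eq_false_iff_ne.2 (Ne.symm hc')
        simp [hcc]
    · intro c' w' hne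
      rw [ih4 c' w' hne, PySem.Dict.getD_insert_of_ne _ _ _ (by simp [hne]), getD_guard']
    · intro w' hne
      rw [ih5 w' hne, PySem.Dict.getD_insert_of_ne _ _ _ hne, getD_guard]
    · rw [ih6, hswv]
      simp
      ring

-- within-sorted-order: everything after the dropped run has a strictly larger weight
lemma dropWhile_weight_gt (w : Int) (rest : List (Int × Int × Int))
    (hp : rest.Pairwise (fun a b => a.1 ≤ b.1)) (hlb : ∀ x ∈ rest, w ≤ x.1) :
    ∀ x ∈ rest.dropWhile (fun y => y.1 == w), w < x.1 := by
  induction rest with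
  | nil => simp
  | cons r rs ih =>
    rw [List.pairwise_cons] at hp
    by_cases hr : r.1 = w
    · rw [List.dropWhile_cons_of_pos (by simp [hr])]
      exact ih hp.2 (fun x hx => hlb x (List.mem_cons_of_mem r hx))
    · rw [List.dropWhile_cons_of_neg (by simp [hr])]
      intro x hx
      have hwr : w < r.1 := lt_of_le_of_ne (hlb r (List.mem_cons_self)) (fun h => hr h.symm)
      rcases List.mem_cons.1 hx with rfl | hx'
      · exact hwr
      · exact lt_of_lt_of_le hwr (hp.1 x hx')

-- the main loop correspondence
lemma mainLoop (n : Nat) (l : List (Int × Int × Int)) (hn : l.length ≤ n)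
    (hp : l.Pairwise (fun a b => a.1 ≤ b.1))
    (ret : PySem.Dict Int Int) (csA csB sw : PySem.Dict Int Int)
    (cw : PySem.Dict (Int × Int) Int) (ws : Int)
    (hcs : ∀ c, csA.getD c 0 = csB.getD c 0)
    (hsw : ∀ x ∈ l, sw.getD x.1 0 = 0)
    (hcw : ∀ x ∈ l, ∀ c, cw.getD (c, x.1) 0 = 0) :
    (l.foldl solveStep (ret, csA, sw, cw, ws)).1 = altLoop l ret csB ws := by
  induction n generalizing l ret csA csB sw cw ws with
  | zero =>
    have hl : l = [] := List.eq_nil_of_length_eq_zero (Nat.le_zero.1 hn)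
    subst hl
    simp [altLoop]
  | succ n ih =>
    match l with
    | [] => simp [altLoop]
    | b :: rest =>
      rw [List.pairwise_cons] at hp
      have hsplit : b :: rest
          = (b :: rest.takeWhile (fun x => x.1 == b.1)) ++ rest.dropWhile (fun x => x.1 == b.1) := by
        rw [List.cons_append, List.takeWhile_append_dropWhile]
      have hwgrp : ∀ x ∈ b :: rest.takeWhile (fun x => x.1 == b.1), x.1 = b.1 := by
        intro x hx
        rcases List.mem_cons.1 hx with rfl | hx'
        · rfl
        · exact beq_iff_eq.1 (List.mem_takeWhile_imp (p := fun (y : Int × Int × Int) => y.1 == b.1) hx')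
      have hswb : sw.getD b.1 0 = 0 := hsw b List.mem_cons_self
      have hcs0 : ∀ c, csA.getD c 0 = csB.getD c 0 + cw.getD (c, b.1) 0 := by
        intro c
        rw [hcw b List.mem_cons_self c, hcs c]
        ring
      have hgt : ∀ x ∈ rest.dropWhile (fun y => y.1 == b.1), b.1 < x.1 :=
        dropWhile_weight_gt b.1 rest hp.2 hp.1
      have hmem : ∀ x ∈ rest.dropWhile (fun y => y.1 == b.1), x ∈ b :: rest :=
        fun x hx => List.mem_cons_of_mem b (((List.dropWhile_sublist _).subset) hx)
      obtain ⟨g1, g2, g3, g4, g5, g6, g7⟩ :=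
        groupA (b :: rest.takeWhile (fun x => x.1 == b.1)) b.1 hwgrp ret csA csB sw cw ws hcs0
      rw [hswb, add_zero] at g1 g2 g3 g4 g5 g6 g7
      have hfold := List.foldl_append (f := solveStep)
        (l := b :: rest.takeWhile (fun x => x.1 == b.1))
        (l' := rest.dropWhile (fun x => x.1 == b.1))
        (b := (ret, csA, sw, cw, ws))
      rw [show altLoop (b :: rest) ret csB ws
            = altLoop (rest.dropWhile (fun x => x.1 == b.1))
                (altRet ws csB ret (b :: rest.takeWhile (fun x => x.1 == b.1)))
                (altCsum csB (b :: rest.takeWhile (fun x => x.1 == b.1)))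
                ((b :: rest.takeWhile (fun x => x.1 == b.1)).foldl (fun a x => a + x.1) ws)
          from by rw [altLoop.eq_def]]
      rw [hsplit, hfold]
      set st := List.foldl solveStep (ret, csA, sw, cw, ws) (b :: rest.takeWhile (fun x => x.1 == b.1)) with hst
      have hstx : st = (st.1, st.2.1, st.2.2.1, st.2.2.2.1, st.2.2.2.2) := rfl
      have hws' : st.2.2.2.2 = (b :: rest.takeWhile (fun x => x.1 == b.1)).foldl (fun a x => a + x.1) ws := by
        rw [g7, g6, PySem.List.foldl_add]
        ring
      have hcs' : ∀ c, st.2.1.getD c 0 = (altCsum csB (b :: rest.takeWhile (fun x => x.1 == b.1))).getD c 0 := by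
        intro c
        rw [g2 c, g3 c, hcw b List.mem_cons_self c, altCsum_getD]
        ring
      have hsw' : ∀ x ∈ rest.dropWhile (fun y => y.1 == b.1), st.2.2.1.getD x.1 0 = 0 := by
        intro x hx
        rw [g5 x.1 (ne_of_gt (hgt x hx))]
        exact hsw x (hmem x hx)
      have hcw' : ∀ x ∈ rest.dropWhile (fun y => y.1 == b.1), ∀ c, st.2.2.2.1.getD (c, x.1) 0 = 0 := by
        intro x hx c
        rw [g4 c x.1 (ne_of_gt (hgt x hx))]
        exact hcw x (hmem x hx) c
      have hlen : (rest.dropWhile (fun y => y.1 == b.1)).length ≤ n := by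
        have h1 := List.length_dropWhile_le (fun y => y.1 == b.1) rest
        simp only [List.length_cons] at hn
        omega
      have hp' : (rest.dropWhile (fun y => y.1 == b.1)).Pairwise (fun a b => a.1 ≤ b.1) :=
        List.Pairwise.sublist (List.dropWhile_sublist _) hp.2
      have := ih (rest.dropWhile (fun y => y.1 == b.1)) hlen hp'
        st.1 st.2.1 (altCsum csB (b :: rest.takeWhile (fun x => x.1 == b.1))) st.2.2.1 st.2.2.2.1
        st.2.2.2.2 hcs' hsw' hcw'
      rw [← hstx] at this
      rw [this, g1, hws']

-- ===== VERDICT (by name: the statement is the Claim_ definition above) =====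
theorem solve_spec : Claim_equal_solve := by
  intro balls _
  unfold Spec_solve solve solve_alt
  congr 1
  exact mainLoop (pySortBalls balls).length _ le_rfl (pySortBalls_pairwise balls)
    _ _ _ _ _ _ (by intro c; rfl) (by intro x _; rfl) (by intro x _ c; rfl)
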